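-- pv_equiv track=rewrite | github.com/advent-of-code-golfing/advent-of-code | chloe/src/twenty_four/twelve/part2.py | calculate_unique_edges
-- ===== SOURCE A (Python) =====
-- def calculate_unique_edges(region: list[tuple[int, int]]) -> int:
--     edges = 0
--     right_angles = []
--     # The number of edges is equivalent to the number of right angles
--     # We will say that the characteristics of a right angle is:
--     # A point with the x,y coordinates of the two points which are
--     # not in the region (i.e. that make it a right angle)
--
--     #  1 2 3
--     #  4 P 5
--     #  6 7 8
--
--     for x, y in region:
--         top_left = (x-1, y-1) # 1
--         top_middle = (x, y-1) # 2
--         top_right = (x+1, y-1) # 3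
--         left_middle = (x-1, y) # 4
--         right_middle = (x+1, y) # 5
--         bottom_left = (x-1, y+1) # 6
--         bottom_middle = (x, y+1) # 7
--         bottom_right = (x+1, y+1) # 8
--
--         if (top_middle not in region and left_middle not in region) or (
--             top_middle in region and left_middle in region and top_left not in region):
--             right_angles.append(((x,y), top_middle, left_middle))
--
--         if (top_middle not in region and right_middle not in region) or (
--             top_middle in region and right_middle in region and top_right not in region):
--             right_angles.append(((x,y), top_middle, right_middle))
--
--         if (bottom_middle not in region and right_middle not in region) or (
--             bottom_middle in region and right_middle in region and bottom_right not in region):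
--             right_angles.append(((x,y), bottom_middle, right_middle))
--
--         if (bottom_middle not in region and left_middle not in region) or (
--             bottom_middle in region and left_middle in region and bottom_left not in region):
--             right_angles.append(((x,y), bottom_middle, left_middle))
--
--     return len(set(right_angles))
-- ===== SOURCE B (Python) =====
-- def calculate_unique_edges(region: list[tuple[int, int]]) -> int:
--     # Vertex-centric: dedup cells, collect the grid vertices touched by any cell,
--     # and add a per-vertex corner multiplicity from the 4-cell neighborhood
--     # pattern (1 if exactly one or three cells present, 2 at a diagonal pinch).
--     cells = set(region)
--     vertices = {(x + dx, y + dy) for (x, y) in cells for dx in (0, 1) for dy in (0, 1)}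
--     total = 0
--     for (vx, vy) in vertices:
--         nw = (vx - 1, vy - 1) in cells
--         ne = (vx, vy - 1) in cells
--         sw = (vx - 1, vy) in cells
--         se = (vx, vy) in cells
--         k = nw + ne + sw + se
--         if k == 1 or k == 3:
--             total += 1
--         elif k == 2 and nw == se:
--             total += 2
--     return total
-- ===== Notes on version B (the rewrite author's own statement) =====
-- stated objective: faster
-- what changed: B switches from A's cell-centric classification (per cell, four labelled corner triples collected in a list and deduplicated with set()) to a vertex-centric count: dedup cells into a hash set, enumerate the grid vertices touched by cells, and add per vertex a corner multiplicity (1 if one or three of the four surrounding cells are present, 2 at a diagonal pinch), removing A's repeated O(n) list-membership scans and the tuple-set construction.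
import Mathlib
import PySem

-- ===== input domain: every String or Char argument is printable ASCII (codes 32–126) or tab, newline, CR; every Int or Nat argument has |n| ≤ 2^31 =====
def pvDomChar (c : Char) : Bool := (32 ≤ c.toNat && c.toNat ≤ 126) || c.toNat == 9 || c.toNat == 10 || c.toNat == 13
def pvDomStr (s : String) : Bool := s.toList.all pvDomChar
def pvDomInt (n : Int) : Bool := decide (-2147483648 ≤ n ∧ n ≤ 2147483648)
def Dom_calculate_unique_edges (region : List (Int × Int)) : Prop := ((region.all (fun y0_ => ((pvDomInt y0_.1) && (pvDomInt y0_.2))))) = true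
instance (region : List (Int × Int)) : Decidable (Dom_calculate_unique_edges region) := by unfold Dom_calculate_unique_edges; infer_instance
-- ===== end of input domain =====

-- B counts corners vertex-centrically (per grid vertex, from the 4 surrounding cells)
-- instead of A's per-cell corner-triple list + set() dedup (faster: no list scans).

-- ===== PORT A =====
-- literal transliteration: for each (x,y), four conditional appends of labelled corner
-- triples, then len(set(...)).
def calculate_unique_edges (region : List (Int × Int)) : Int :=
  let right_angles : List ((Int × Int) × (Int × Int) × (Int × Int)) :=
    region.foldl (fun acc p =>
      let x := p.1
      let y := p.2
      let top_left := (x-1, y-1)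
      let top_middle := (x, y-1)
      let top_right := (x+1, y-1)
      let left_middle := (x-1, y)
      let right_middle := (x+1, y)
      let bottom_left := (x-1, y+1)
      let bottom_middle := (x, y+1)
      let bottom_right := (x+1, y+1)
      let acc := if (top_middle ∉ region ∧ left_middle ∉ region) ∨
          (top_middle ∈ region ∧ left_middle ∈ region ∧ top_left ∉ region) then
        acc ++ [((x, y), top_middle, left_middle)] else acc
      let acc := if (top_middle ∉ region ∧ right_middle ∉ region) ∨
          (top_middle ∈ region ∧ right_middle ∈ region ∧ top_right ∉ region) then
        acc ++ [((x, y), top_middle, right_middle)] else acc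
      let acc := if (bottom_middle ∉ region ∧ right_middle ∉ region) ∨
          (bottom_middle ∈ region ∧ right_middle ∈ region ∧ bottom_right ∉ region) then
        acc ++ [((x, y), bottom_middle, right_middle)] else acc
      let acc := if (bottom_middle ∉ region ∧ left_middle ∉ region) ∨
          (bottom_middle ∈ region ∧ left_middle ∈ region ∧ bottom_left ∉ region) then
        acc ++ [((x, y), bottom_middle, left_middle)] else acc
      acc) []
  ((PySem.Set.ofList right_angles).length : Int)

-- ===== PORT B =====
-- transliteration of Source B: cells = set(region); vertices = set of the 4 grid vertices
-- of each cell; sum a per-vertex corner multiplicity (the sum is iteration-order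
-- independent, so consuming the Set by folding is exact).
def calculate_unique_edges_alt (region : List (Int × Int)) : Int :=
  let cells : PySem.Set (Int × Int) := PySem.Set.ofList region
  let vertices : PySem.Set (Int × Int) :=
    PySem.Set.ofList (cells.flatMap (fun p =>
      [(0 : Int), 1].flatMap (fun dx => [(0 : Int), 1].map (fun dy => (p.1 + dx, p.2 + dy)))))
  vertices.foldl (fun total v =>
    let nw : Bool := decide ((v.1 - 1, v.2 - 1) ∈ cells)
    let ne : Bool := decide ((v.1, v.2 - 1) ∈ cells)
    let sw : Bool := decide ((v.1 - 1, v.2) ∈ cells)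
    let se : Bool := decide ((v.1, v.2) ∈ cells)
    let k : Int := (if nw then 1 else 0) + (if ne then 1 else 0) +
                   (if sw then 1 else 0) + (if se then 1 else 0)
    if k = 1 ∨ k = 3 then total + 1
    else if k = 2 ∧ nw = se then total + 2
    else total) 0

-- ===== PRECONDITION & SPEC =====
def Spec_calculate_unique_edges (region : List (Int × Int)) (out : Int) : Prop := out = calculate_unique_edges_alt region
instance (region : List (Int × Int)) (out : Int) : Decidable (Spec_calculate_unique_edges region out) := by unfold Spec_calculate_unique_edges; infer_instance

-- ===== CLAIM (what is proved, stated in full; the proofs are below) =====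
def Claim_equal_calculate_unique_edges : Prop := ∀ (region : List (Int × Int)), Dom_calculate_unique_edges region → Spec_calculate_unique_edges region (calculate_unique_edges region)

-- ===== LEMMAS AND PROOFS =====

-- A's four conditional appends at one cell, as a list
def pvConds (L : List (Int × Int)) (p : Int × Int) :
    List ((Int × Int) × (Int × Int) × (Int × Int)) :=
  (if (p.1, p.2-1) ∉ L ∧ (p.1-1, p.2) ∉ L ∨ (p.1, p.2-1) ∈ L ∧ (p.1-1, p.2) ∈ L ∧ (p.1-1, p.2-1) ∉ L then
    [((p.1, p.2), (p.1, p.2-1), (p.1-1, p.2))] else []) ++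
  (if (p.1, p.2-1) ∉ L ∧ (p.1+1, p.2) ∉ L ∨ (p.1, p.2-1) ∈ L ∧ (p.1+1, p.2) ∈ L ∧ (p.1+1, p.2-1) ∉ L then
    [((p.1, p.2), (p.1, p.2-1), (p.1+1, p.2))] else []) ++
  (if (p.1, p.2+1) ∉ L ∧ (p.1+1, p.2) ∉ L ∨ (p.1, p.2+1) ∈ L ∧ (p.1+1, p.2) ∈ L ∧ (p.1+1, p.2+1) ∉ L then
    [((p.1, p.2), (p.1, p.2+1), (p.1+1, p.2))] else []) ++
  (if (p.1, p.2+1) ∉ L ∧ (p.1-1, p.2) ∉ L ∨ (p.1, p.2+1) ∈ L ∧ (p.1-1, p.2) ∈ L ∧ (p.1-1, p.2+1) ∉ L then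
    [((p.1, p.2), (p.1, p.2+1), (p.1-1, p.2))] else [])

theorem pvConds_fst (L : List (Int × Int)) (p : Int × Int) :
    ∀ t ∈ pvConds L p, t.1 = p := by
  intro t ht
  unfold pvConds at ht
  split_ifs at ht <;> simp only [List.mem_append, List.mem_singleton, List.not_mem_nil, or_false, false_or] at ht <;> rcases ht with ((rfl | rfl) | rfl) | rfl | (rfl | rfl) | rfl | rfl | (rfl | rfl) | rfl <;> rfl

theorem pvConds_nodup (L : List (Int × Int)) (p : Int × Int) : (pvConds L p).Nodup := by
  unfold pvConds
  split_ifs <;> simp [Prod.ext_iff] <;> omega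

theorem ofList_flatMap_graded {α β : Type} [BEq α] [LawfulBEq α] [BEq β] [LawfulBEq β] (f : α → List β) (g : β → α)
    (hg : ∀ c t, t ∈ f c → g t = c) (hnd : ∀ c, (f c).Nodup) (xs : List α) :
    PySem.Set.ofList (xs.flatMap f) = (PySem.Set.ofList xs).flatMap f := by
  induction xs using List.reverseRecOn with
  | nil => rfl
  | append_singleton ys c IH =>
    rw [List.flatMap_append, PySem.Set.ofList_append, IH, PySem.Set.ofList_append_singleton,
      List.flatMap_singleton]
    by_cases hc : c ∈ ys
    · rw [PySem.Set.add_of_mem (by simpa [PySem.Set.mem_ofList] using hc)]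
      rw [PySem.Set.update_eq_append_filter]
      have : ((PySem.Set.ofList (f c)).filter
          (fun y => !(PySem.Set.contains ((PySem.Set.ofList ys).flatMap f) y))) = [] := by
        apply List.filter_eq_nil_iff.mpr
        intro t ht
        simp only [Bool.not_eq_true', Bool.not_eq_false]
        rw [PySem.Set.contains_iff]
        exact List.mem_flatMap.mpr ⟨c, by simpa [PySem.Set.mem_ofList] using hc,
          (PySem.Set.mem_ofList _ _).mp ht⟩
      rw [this, List.append_nil]
    · rw [PySem.Set.add_of_not_mem (by simpa [PySem.Set.mem_ofList] using hc)]
      rw [List.flatMap_append, List.flatMap_singleton]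
      apply PySem.Set.update_eq_append_of_disjoint _ _ (hnd c)
      intro t ht hmem
      obtain ⟨c', hc', htc'⟩ := List.mem_flatMap.mp hmem
      have := hg c' t htc'
      have := hg c t ht
      exact hc (by simpa [PySem.Set.mem_ofList, this ▸ hg c' t htc'] using hc')

theorem pvA_shape (region : List (Int × Int)) :
    calculate_unique_edges region =
      ((PySem.Set.ofList (region.flatMap (pvConds region))).length : Int) := by
  unfold calculate_unique_edges
  have h : region.foldl (fun acc p =>
      let x := p.1
      let y := p.2
      let top_left := (x-1, y-1)
      let top_middle := (x, y-1)
      let top_right := (x+1, y-1)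
      let left_middle := (x-1, y)
      let right_middle := (x+1, y)
      let bottom_left := (x-1, y+1)
      let bottom_middle := (x, y+1)
      let bottom_right := (x+1, y+1)
      let acc := if (top_middle ∉ region ∧ left_middle ∉ region) ∨
          (top_middle ∈ region ∧ left_middle ∈ region ∧ top_left ∉ region) then
        acc ++ [((x, y), top_middle, left_middle)] else acc
      let acc := if (top_middle ∉ region ∧ right_middle ∉ region) ∨
          (top_middle ∈ region ∧ right_middle ∈ region ∧ top_right ∉ region) then
        acc ++ [((x, y), top_middle, right_middle)] else acc
      let acc := if (bottom_middle ∉ region ∧ right_middle ∉ region) ∨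
          (bottom_middle ∈ region ∧ right_middle ∈ region ∧ bottom_right ∉ region) then
        acc ++ [((x, y), bottom_middle, right_middle)] else acc
      let acc := if (bottom_middle ∉ region ∧ left_middle ∉ region) ∨
          (bottom_middle ∈ region ∧ left_middle ∈ region ∧ bottom_left ∉ region) then
        acc ++ [((x, y), bottom_middle, left_middle)] else acc
      acc) [] = region.foldl (fun acc p => acc ++ pvConds region p) [] := by
    congr 1
    funext acc p
    dsimp only
    unfold pvConds
    split_ifs <;> simp
  rw [h, PySem.List.foldl_append_eq_flatMap, List.nil_append]

-- the four per-vertex corner indicators: pvGi L v = 1 iff the quadrant-i cell of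
-- vertex v is in L and A's corresponding branch fires at that cell
def pvG0 (L : List (Int × Int)) (v : Int × Int) : Int :=
  if (v.1, v.2) ∈ L ∧ ((v.1, v.2-1) ∉ L ∧ (v.1-1, v.2) ∉ L ∨
      (v.1, v.2-1) ∈ L ∧ (v.1-1, v.2) ∈ L ∧ (v.1-1, v.2-1) ∉ L) then 1 else 0
def pvG1 (L : List (Int × Int)) (v : Int × Int) : Int :=
  if (v.1-1, v.2) ∈ L ∧ ((v.1-1, v.2-1) ∉ L ∧ (v.1, v.2) ∉ L ∨
      (v.1-1, v.2-1) ∈ L ∧ (v.1, v.2) ∈ L ∧ (v.1, v.2-1) ∉ L) then 1 else 0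
def pvG2 (L : List (Int × Int)) (v : Int × Int) : Int :=
  if (v.1-1, v.2-1) ∈ L ∧ ((v.1-1, v.2) ∉ L ∧ (v.1, v.2-1) ∉ L ∨
      (v.1-1, v.2) ∈ L ∧ (v.1, v.2-1) ∈ L ∧ (v.1, v.2) ∉ L) then 1 else 0
def pvG3 (L : List (Int × Int)) (v : Int × Int) : Int :=
  if (v.1, v.2-1) ∈ L ∧ ((v.1, v.2) ∉ L ∧ (v.1-1, v.2-1) ∉ L ∨
      (v.1, v.2) ∈ L ∧ (v.1-1, v.2-1) ∈ L ∧ (v.1-1, v.2) ∉ L) then 1 else 0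

-- B's per-vertex addend
def pvVal (L : List (Int × Int)) (v : Int × Int) : Int :=
  let nw : Bool := decide ((v.1 - 1, v.2 - 1) ∈ L)
  let ne : Bool := decide ((v.1, v.2 - 1) ∈ L)
  let sw : Bool := decide ((v.1 - 1, v.2) ∈ L)
  let se : Bool := decide ((v.1, v.2) ∈ L)
  let k : Int := (if nw then 1 else 0) + (if ne then 1 else 0) +
                 (if sw then 1 else 0) + (if se then 1 else 0)
  if k = 1 ∨ k = 3 then 1 else if k = 2 ∧ nw = se then 2 else 0

-- the vertex list B builds (before dedup)
def pvVertList (L : List (Int × Int)) : List (Int × Int) :=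
  (PySem.Set.ofList L).flatMap (fun p =>
    [(0 : Int), 1].flatMap (fun dx => [(0 : Int), 1].map (fun dy => (p.1 + dx, p.2 + dy))))

theorem pvMem_vertList (L : List (Int × Int)) (v : Int × Int) :
    v ∈ pvVertList L ↔ ∃ p ∈ L, v = (p.1, p.2) ∨ v = (p.1 + 1, p.2) ∨
      v = (p.1, p.2 + 1) ∨ v = (p.1 + 1, p.2 + 1) := by
  unfold pvVertList
  simp only [List.mem_flatMap, PySem.Set.mem_ofList, List.mem_map]
  constructor
  · rintro ⟨p, hp, dx, hdx, dy, hdy, rfl⟩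
    refine ⟨p, hp, ?_⟩
    simp only [List.mem_cons, List.not_mem_nil, or_false] at hdx hdy
    rcases hdx with rfl | rfl <;> rcases hdy with rfl | rfl <;> simp
  · rintro ⟨p, hp, h⟩
    rcases h with rfl | rfl | rfl | rfl
    · exact ⟨p, hp, 0, by simp, 0, by simp⟩
    · exact ⟨p, hp, 1, by simp, 0, by simp⟩
    · exact ⟨p, hp, 0, by simp, 1, by simp⟩
    · exact ⟨p, hp, 1, by simp, 1, by simp⟩

-- B's fold = sum of pvVal over the deduplicated vertex list
theorem pvB_sum (region : List (Int × Int)) :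
    calculate_unique_edges_alt region =
      ((PySem.Set.ofList (pvVertList region)).map (pvVal region)).sum := by
  unfold calculate_unique_edges_alt pvVertList
  dsimp only
  have hbody : (fun (total : Int) (v : Int × Int) =>
      let nw : Bool := decide ((v.1 - 1, v.2 - 1) ∈ PySem.Set.ofList region)
      let ne : Bool := decide ((v.1, v.2 - 1) ∈ PySem.Set.ofList region)
      let sw : Bool := decide ((v.1 - 1, v.2) ∈ PySem.Set.ofList region)
      let se : Bool := decide ((v.1, v.2) ∈ PySem.Set.ofList region)
      let k : Int := (if nw then 1 else 0) + (if ne then 1 else 0) +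
                     (if sw then 1 else 0) + (if se then 1 else 0)
      if k = 1 ∨ k = 3 then total + 1
      else if k = 2 ∧ nw = se then total + 2
      else total)
      = (fun total v => total + pvVal region v) := by
    funext total v
    simp only [pvVal, PySem.Set.mem_ofList]
    split_ifs <;> omega
  rw [hbody, PySem.List.foldl_add, zero_add]

-- sum of f over a deduplicated list = Finset sum over its members
theorem pvSum_ofList_toFinset (l : List (Int × Int)) (f : Int × Int → Int) :
    ((PySem.Set.ofList l).map f).sum = ∑ x ∈ l.toFinset, f x := by
  have hnd : (PySem.Set.ofList l).Nodup := PySem.Set.nodup_ofList l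
  have : (PySem.Set.ofList l).toFinset = l.toFinset := by
    ext x
    simp [PySem.Set.mem_ofList]
  rw [← this, List.sum_toFinset f hnd]

-- A's per-cell count splits into the four vertex indicators
theorem pvCnt_eq (L : List (Int × Int)) (p : Int × Int) (hp : p ∈ L) :
    ((pvConds L p).length : Int) =
      pvG0 L (p.1, p.2) + pvG1 L (p.1 + 1, p.2) + pvG2 L (p.1 + 1, p.2 + 1) +
        pvG3 L (p.1, p.2 + 1) := by
  have hp' : (p.1, p.2) ∈ L := by simpa using hp
  simp only [pvConds, pvG0, pvG1, pvG2, pvG3, add_sub_cancel_right, hp', true_and,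
    List.length_append]
  split_ifs <;> simp

-- per vertex, the four indicators sum to B's addend (16-case check)
theorem pvVertex_eq (L : List (Int × Int)) (v : Int × Int) :
    pvG0 L v + pvG1 L v + pvG2 L v + pvG3 L v = pvVal L v := by
  simp only [pvG0, pvG1, pvG2, pvG3, pvVal]
  by_cases h1 : (v.1 - 1, v.2 - 1) ∈ L <;>
    by_cases h2 : (v.1, v.2 - 1) ∈ L <;>
    by_cases h3 : (v.1 - 1, v.2) ∈ L <;>
    by_cases h4 : (v.1, v.2) ∈ L <;>
    simp [h1, h2, h3, h4]

-- reindexing: summing an indicator over cells at a shifted vertex equals summing it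
-- over all vertices (it vanishes on vertices whose quadrant cell is absent)
theorem pvReindex (L : List (Int × Int)) (a b : Int) (ha : a = 0 ∨ a = 1)
    (hb : b = 0 ∨ b = 1) (g : Int × Int → Int)
    (hzero : ∀ v, g v ≠ 0 → (v.1 - a, v.2 - b) ∈ L) :
    ∑ p ∈ L.toFinset, g (p.1 + a, p.2 + b) = ∑ v ∈ (pvVertList L).toFinset, g v := by
  have hinj : ∀ x ∈ L.toFinset, ∀ y ∈ L.toFinset,
      ((x : Int × Int).1 + a, x.2 + b) = (y.1 + a, y.2 + b) → x = y := by
    intro x _ y _ h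
    obtain ⟨h1, h2⟩ := Prod.mk.injEq .. ▸ h
    exact Prod.ext (by omega) (by omega)
  rw [← Finset.sum_image hinj]
  apply Finset.sum_subset
  · intro v hv
    simp only [Finset.mem_image, List.mem_toFinset] at hv
    obtain ⟨p, hp, rfl⟩ := hv
    rw [List.mem_toFinset, pvMem_vertList]
    refine ⟨p, hp, ?_⟩
    rcases ha with rfl | rfl <;> rcases hb with rfl | rfl <;> simp
  · intro v _ hv
    by_contra hne
    apply hv
    simp only [Finset.mem_image, List.mem_toFinset]
    exact ⟨(v.1 - a, v.2 - b), hzero v hne, by simp⟩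

theorem pvG0_zero (L : List (Int × Int)) (v : Int × Int) (h : pvG0 L v ≠ 0) :
    (v.1 - 0, v.2 - 0) ∈ L := by
  simp only [pvG0] at h
  split_ifs at h with hc
  · simpa using hc.1
  · exact absurd rfl h

theorem pvG1_zero (L : List (Int × Int)) (v : Int × Int) (h : pvG1 L v ≠ 0) :
    (v.1 - 1, v.2 - 0) ∈ L := by
  simp only [pvG1] at h
  split_ifs at h with hc
  · simpa using hc.1
  · exact absurd rfl h

theorem pvG2_zero (L : List (Int × Int)) (v : Int × Int) (h : pvG2 L v ≠ 0) :
    (v.1 - 1, v.2 - 1) ∈ L := by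
  simp only [pvG2] at h
  split_ifs at h with hc
  · exact hc.1
  · exact absurd rfl h

theorem pvG3_zero (L : List (Int × Int)) (v : Int × Int) (h : pvG3 L v ≠ 0) :
    (v.1 - 0, v.2 - 1) ∈ L := by
  simp only [pvG3] at h
  split_ifs at h with hc
  · simpa using hc.1
  · exact absurd rfl h

theorem pv_main (region : List (Int × Int)) :
    calculate_unique_edges region = calculate_unique_edges_alt region := by
  rw [pvA_shape, pvB_sum,
    ofList_flatMap_graded (pvConds region) (fun t => t.1) (pvConds_fst region)
      (pvConds_nodup region) region,
    List.length_flatMap, Nat.cast_list_sum, List.map_map,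
    pvSum_ofList_toFinset (pvVertList region) (pvVal region)]
  have hA : ((PySem.Set.ofList region).map
        (Nat.cast ∘ fun x => (pvConds region x).length)).sum
      = ∑ p ∈ region.toFinset, ((pvConds region p).length : Int) :=
    pvSum_ofList_toFinset region _
  rw [hA]
  have hsplit : ∑ p ∈ region.toFinset, ((pvConds region p).length : Int)
      = (∑ p ∈ region.toFinset, pvG0 region (p.1 + 0, p.2 + 0)) +
        (∑ p ∈ region.toFinset, pvG1 region (p.1 + 1, p.2 + 0)) +
        (∑ p ∈ region.toFinset, pvG2 region (p.1 + 1, p.2 + 1)) +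
        (∑ p ∈ region.toFinset, pvG3 region (p.1 + 0, p.2 + 1)) := by
    rw [← Finset.sum_add_distrib, ← Finset.sum_add_distrib, ← Finset.sum_add_distrib]
    apply Finset.sum_congr rfl
    intro p hp
    rw [pvCnt_eq region p (List.mem_toFinset.mp hp)]
    norm_num
  rw [hsplit,
    pvReindex region 0 0 (Or.inl rfl) (Or.inl rfl) (pvG0 region) (pvG0_zero region),
    pvReindex region 1 0 (Or.inr rfl) (Or.inl rfl) (pvG1 region) (pvG1_zero region),
    pvReindex region 1 1 (Or.inr rfl) (Or.inr rfl) (pvG2 region) (pvG2_zero region),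
    pvReindex region 0 1 (Or.inl rfl) (Or.inr rfl) (pvG3 region) (pvG3_zero region),
    ← Finset.sum_add_distrib, ← Finset.sum_add_distrib, ← Finset.sum_add_distrib]
  exact Finset.sum_congr rfl fun v _ => pvVertex_eq region v

-- ===== VERDICT (by name: the statement is the Claim_ definition above) =====
theorem calculate_unique_edges_spec : Claim_equal_calculate_unique_edges := by
  intro region _
  unfold Spec_calculate_unique_edges
  exact pv_main region
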